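-- pv_equiv track=rewrite | github.com/4n0nym0u5-3y3/2048-game | 2048-game.py | compress_grid
-- ===== SOURCE A (Python) =====
-- def compress_grid(grid):
--     new_grid = [[0] * 4 for _ in range(4)]
--     changed = False
--     for i in range(4):
--         pos = 0
--         for j in range(4):
--             if grid[i][j] != 0:
--                 new_grid[i][pos] = grid[i][j]
--                 if j != pos:
--                     changed = True
--                 pos += 1
--     return new_grid, changed
-- ===== SOURCE B (Python) =====
-- def compress_grid(grid):
--     rows = [[grid[i][j] for j in range(4)] for i in range(4)]
--     new_grid = [sorted(row, key=lambda x: 1 if x == 0 else 0) for row in rows]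
--     changed = new_grid != rows
--     return new_grid, changed
-- ===== Notes on version B (the rewrite author's own statement) =====
-- stated objective: alternative
-- what changed: Replaces A's position-pointer writes into a preallocated 4x4 grid with per-tile move flagging (j != pos) by a stable sort of each row under the key 'is zero' (zeros sink to the back, nonzeros keep their order) plus one whole-grid comparison to derive changed.
import Mathlib
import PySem

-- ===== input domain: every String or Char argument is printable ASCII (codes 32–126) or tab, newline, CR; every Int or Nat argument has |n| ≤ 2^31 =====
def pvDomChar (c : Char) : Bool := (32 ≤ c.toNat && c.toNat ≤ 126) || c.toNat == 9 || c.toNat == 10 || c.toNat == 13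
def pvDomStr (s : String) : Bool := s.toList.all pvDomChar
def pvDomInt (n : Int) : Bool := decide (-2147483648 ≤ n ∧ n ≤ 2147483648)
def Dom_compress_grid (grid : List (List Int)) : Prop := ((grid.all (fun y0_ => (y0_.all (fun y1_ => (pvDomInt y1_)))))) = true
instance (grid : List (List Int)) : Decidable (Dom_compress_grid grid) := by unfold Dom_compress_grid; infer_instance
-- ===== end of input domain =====

-- B stable-sorts each row by the key "is zero" (zeros last, nonzeros keep their order) and derives
-- the changed flag by one whole-grid comparison, instead of A's position-pointer writes into a
-- preallocated grid with per-tile move flagging (objective: alternative).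


-- ===== PORT A =====
-- one inner-loop step of A: the body of 'for j in range(4)' (the grid[i][j] read and the
-- new_grid[i][pos] write use the total pyGetD/pySetD forms; Pre_ keeps every index Python
-- dereferences in range, exactly where the Python returns instead of raising IndexError)
def cgStep (grid : List (List Int)) (i : Int) (st : List (List Int) × Bool × Int) (j : Int) :
    List (List Int) × Bool × Int :=
  let v := PySem.List.pyGetD (PySem.List.pyGetD grid i []) j 0
  if v ≠ 0 then
    (PySem.List.pySetD st.1 i (PySem.List.pySetD (PySem.List.pyGetD st.1 i []) st.2.2 v),
     (if j ≠ st.2.2 then true else st.2.1), st.2.2 + 1)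
  else st

def compress_grid (grid : List (List Int)) : List (List Int) × Bool :=
  let res :=
    (PySem.List.pyRange 0 4 1).foldl
      (fun (st : List (List Int) × Bool) i =>
        let r := (PySem.List.pyRange 0 4 1).foldl (cgStep grid i) (st.1, st.2, 0)
        (r.1, r.2.1))
      ((PySem.List.pyRange 0 4 1).map (fun _ => List.replicate 4 (0 : Int)), false)
  res

-- ===== PORT B =====
-- Source B: rows = first-four values of the first four rows; new_grid = each row stably sorted by
-- the key '1 if x == 0 else 0' (zeros to the back, nonzeros keep order); changed = new_grid != rows
def compress_grid_alt (grid : List (List Int)) : List (List Int) × Bool :=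
  let rows := (PySem.List.pyRange 0 4 1).map
    (fun i => (PySem.List.pyRange 0 4 1).map
      (fun j => PySem.List.pyGetD (PySem.List.pyGetD grid i []) j 0))
  let new_grid := rows.map
    (fun row => PySem.List.sorted row (fun x => if x = 0 then (1 : Int) else 0) false)
  (new_grid, decide (new_grid ≠ rows))

-- ===== PRECONDITION & SPEC =====
-- Pre_: the grid has at least 4 rows and each of the first 4 rows has at least 4 entries —
-- exactly where Python A's grid[i][j] (i, j in range(4)) returns instead of raising IndexError.
def Pre_compress_grid (grid : List (List Int)) : Prop :=
  4 ≤ grid.length ∧ ∀ r ∈ grid.take 4, 4 ≤ r.length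
instance (grid : List (List Int)) : Decidable (Pre_compress_grid grid) := by
  unfold Pre_compress_grid; infer_instance

def pvWitness_compress_grid : List (List Int) :=
  [[0, 2, 0, 2], [4, 0, 0, 4], [0, 0, 0, 0], [2, 4, 8, 16]]

def Spec_compress_grid (grid : List (List Int)) (out : List (List Int) × Bool) : Prop := out = compress_grid_alt grid
instance (grid : List (List Int)) (out : List (List Int) × Bool) : Decidable (Spec_compress_grid grid out) := by unfold Spec_compress_grid; infer_instance

-- ===== CLAIM (what is proved, stated in full; the proofs are below) =====
def Claim_equal_compress_grid : Prop := ∀ (grid : List (List Int)), Dom_compress_grid grid → Pre_compress_grid grid → Spec_compress_grid grid (compress_grid grid)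

-- ===== LEMMAS AND PROOFS =====

-- filter-and-pad characterisation of a compressed row, and the per-row change flag / final pos
def padRow (l : List Int) : List Int :=
  let comp := l.filter (fun x => x != 0)
  comp ++ List.replicate (4 - comp.length) (0 : Int)

def movRow (l : List Int) : Bool := decide (padRow l ≠ l)

def cntRow (l : List Int) : Int := ((l.filter (fun x => x != 0)).length : Int)

-- the first four entries of row i of the grid, as both programs read them
def vals (grid : List (List Int)) (i : Int) : List Int :=
  [PySem.List.pyGetD (PySem.List.pyGetD grid i []) 0 0,
   PySem.List.pyGetD (PySem.List.pyGetD grid i []) 1 0,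
   PySem.List.pyGetD (PySem.List.pyGetD grid i []) 2 0,
   PySem.List.pyGetD (PySem.List.pyGetD grid i []) 3 0]

-- A's inner-loop step acting on row i only, with the row reads abstracted into f
def absStep (f : Int → Int) (st : List Int × Bool × Int) (j : Int) : List Int × Bool × Int :=
  let v := f j
  if v ≠ 0 then
    (PySem.List.pySetD st.1 st.2.2 v, (if j ≠ st.2.2 then true else st.2.1), st.2.2 + 1)
  else st

lemma pyR4 : PySem.List.pyRange 0 4 1 = [0, 1, 2, 3] := by decide

-- B's stable sort by 'is zero' on a four-value row IS the filter-and-pad row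
set_option maxHeartbeats 1000000 in
lemma sorted4 (a b c d : Int) :
    PySem.List.sorted [a, b, c, d] (fun x => if x = 0 then (1 : Int) else 0) false
      = padRow [a, b, c, d] := by
  by_cases ha : a = 0 <;> by_cases hb : b = 0 <;> by_cases hc : c = 0 <;> by_cases hd : d = 0 <;>
    simp_all [PySem.List.sorted_eq_foldl_insertBy, PySem.List.insertBy, List.foldl, padRow]

-- A's inner loop only reads and writes row i of new_grid
lemma lift (grid : List (List Int)) (i : Int) (hi : 0 ≤ i) (js : List Int) :
    ∀ (ng : List (List Int)) (ch : Bool) (pos : Int), i.toNat < ng.length →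
      List.foldl (cgStep grid i) (ng, ch, pos) js
        = ((PySem.List.pySetD ng i
              (List.foldl (absStep (fun j => PySem.List.pyGetD (PySem.List.pyGetD grid i []) j 0))
                (PySem.List.pyGetD ng i [], ch, pos) js).1),
           (List.foldl (absStep (fun j => PySem.List.pyGetD (PySem.List.pyGetD grid i []) j 0))
                (PySem.List.pyGetD ng i [], ch, pos) js).2) := by
  induction js with
  | nil =>
      intro ng ch pos h
      simp only [List.foldl]
      rw [PySem.List.pyGetD_eq_getElem ng [] hi (by omega)]
      rw [PySem.List.pySetD_of_nonneg ng _ hi, List.set_getElem_self h]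
  | cons j js ih =>
      intro ng ch pos h
      simp only [List.foldl]
      by_cases hv : PySem.List.pyGetD (PySem.List.pyGetD grid i []) j 0 ≠ 0
      · simp only [cgStep, absStep, if_pos hv]
        rw [ih _ _ _ (by rw [PySem.List.pySetD_of_nonneg ng _ hi]; simpa using h)]
        have hget : ∀ w : List Int, PySem.List.pyGetD (PySem.List.pySetD ng i w) i [] = w := by
          intro w
          rw [PySem.List.pySetD_of_nonneg ng _ hi,
            PySem.List.pyGetD_eq_getElem _ [] hi (by simp; omega)]
          exact List.getElem_set_self (by simpa using h)
        have hss : ∀ w u : List Int,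
            PySem.List.pySetD (PySem.List.pySetD ng i w) i u = PySem.List.pySetD ng i u := by
          intro w u
          rw [PySem.List.pySetD_of_nonneg ng _ hi, PySem.List.pySetD_of_nonneg _ _ hi,
            PySem.List.pySetD_of_nonneg ng _ hi, List.set_set]
        rw [hget, hss]
      · simp only [cgStep, absStep, if_neg hv]
        exact ih ng ch pos h

-- evaluating A's inner loop on an all-zero row: filter-and-pad result, row-comparison flag
set_option maxHeartbeats 1000000 in
lemma innerAbs (f : Int → Int) (ch : Bool) (a b c d : Int)
    (h0 : f 0 = a) (h1 : f 1 = b) (h2 : f 2 = c) (h3 : f 3 = d) :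
    List.foldl (absStep f) ([0, 0, 0, 0], ch, 0) [0, 1, 2, 3]
      = (padRow [a, b, c, d], ch || movRow [a, b, c, d], cntRow [a, b, c, d]) := by
  by_cases ha : a = 0 <;> by_cases hb : b = 0 <;> by_cases hc : c = 0 <;> by_cases hd : d = 0 <;>
    simp_all [List.foldl, absStep, padRow, movRow, cntRow,
      PySem.List.pySetD, PySem.List.pySet?, PySem.List.pyIdx?]

lemma row0 (grid : List (List Int)) (ch : Bool) (r1 r2 r3 : List Int) :
    List.foldl (cgStep grid 0) ([[0, 0, 0, 0], r1, r2, r3], ch, 0) [0, 1, 2, 3]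
      = ([padRow (vals grid 0), r1, r2, r3], ch || movRow (vals grid 0), cntRow (vals grid 0)) := by
  rw [lift grid 0 (by norm_num) _ _ _ _ (by simp)]
  rw [show PySem.List.pyGetD ([[0, 0, 0, 0], r1, r2, r3] : List (List Int)) 0 [] = [0, 0, 0, 0] from rfl]
  rw [innerAbs _ ch _ _ _ _ rfl rfl rfl rfl]
  simp [vals, PySem.List.pySetD, PySem.List.pySet?, PySem.List.pyIdx?]

lemma row1 (grid : List (List Int)) (ch : Bool) (q0 r2 r3 : List Int) :
    List.foldl (cgStep grid 1) ([q0, [0, 0, 0, 0], r2, r3], ch, 0) [0, 1, 2, 3]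
      = ([q0, padRow (vals grid 1), r2, r3], ch || movRow (vals grid 1), cntRow (vals grid 1)) := by
  rw [lift grid 1 (by norm_num) _ _ _ _ (by simp)]
  rw [show PySem.List.pyGetD ([q0, [0, 0, 0, 0], r2, r3] : List (List Int)) 1 [] = [0, 0, 0, 0] from rfl]
  rw [innerAbs _ ch _ _ _ _ rfl rfl rfl rfl]
  simp [vals, PySem.List.pySetD, PySem.List.pySet?, PySem.List.pyIdx?]

lemma row2 (grid : List (List Int)) (ch : Bool) (q0 q1 r3 : List Int) :
    List.foldl (cgStep grid 2) ([q0, q1, [0, 0, 0, 0], r3], ch, 0) [0, 1, 2, 3]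
      = ([q0, q1, padRow (vals grid 2), r3], ch || movRow (vals grid 2), cntRow (vals grid 2)) := by
  rw [lift grid 2 (by norm_num) _ _ _ _ (by simp)]
  rw [show PySem.List.pyGetD ([q0, q1, [0, 0, 0, 0], r3] : List (List Int)) 2 [] = [0, 0, 0, 0] from rfl]
  rw [innerAbs _ ch _ _ _ _ rfl rfl rfl rfl]
  simp [vals, PySem.List.pySetD, PySem.List.pySet?, PySem.List.pyIdx?]

lemma row3 (grid : List (List Int)) (ch : Bool) (q0 q1 q2  : List Int) :
    List.foldl (cgStep grid 3) ([q0, q1, q2, [0, 0, 0, 0]], ch, 0) [0, 1, 2, 3]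
      = ([q0, q1, q2, padRow (vals grid 3)], ch || movRow (vals grid 3), cntRow (vals grid 3)) := by
  rw [lift grid 3 (by norm_num) _ _ _ _ (by simp)]
  rw [show PySem.List.pyGetD ([q0, q1, q2, [0, 0, 0, 0]] : List (List Int)) 3 [] = [0, 0, 0, 0] from rfl]
  rw [innerAbs _ ch _ _ _ _ rfl rfl rfl rfl]
  simp [vals, PySem.List.pySetD, PySem.List.pySet?, PySem.List.pyIdx?]

lemma row0' (grid : List (List Int)) (r1 r2 r3 : List Int) (ch : Bool) :
    cgStep grid 0 (cgStep grid 0 (cgStep grid 0 (cgStep grid 0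
        (([[0, 0, 0, 0], r1, r2, r3] : List (List Int)), ch, (0 : Int)) 0) 1) 2) 3
      = ([padRow (vals grid 0), r1, r2, r3], ch || movRow (vals grid 0), cntRow (vals grid 0)) := by
  have h := row0 grid ch r1 r2 r3
  simpa only [List.foldl] using h

lemma row1' (grid : List (List Int)) (q0 r2 r3 : List Int) (ch : Bool) :
    cgStep grid 1 (cgStep grid 1 (cgStep grid 1 (cgStep grid 1
        (([q0, [0, 0, 0, 0], r2, r3] : List (List Int)), ch, (0 : Int)) 0) 1) 2) 3
      = ([q0, padRow (vals grid 1), r2, r3], ch || movRow (vals grid 1), cntRow (vals grid 1)) := by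
  have h := row1 grid ch q0 r2 r3
  simpa only [List.foldl] using h

lemma row2' (grid : List (List Int)) (q0 q1 r3 : List Int) (ch : Bool) :
    cgStep grid 2 (cgStep grid 2 (cgStep grid 2 (cgStep grid 2
        (([q0, q1, [0, 0, 0, 0], r3] : List (List Int)), ch, (0 : Int)) 0) 1) 2) 3
      = ([q0, q1, padRow (vals grid 2), r3], ch || movRow (vals grid 2), cntRow (vals grid 2)) := by
  have h := row2 grid ch q0 q1 r3
  simpa only [List.foldl] using h

lemma row3' (grid : List (List Int)) (q0 q1 q2 : List Int) (ch : Bool) :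
    cgStep grid 3 (cgStep grid 3 (cgStep grid 3 (cgStep grid 3
        (([q0, q1, q2, [0, 0, 0, 0]] : List (List Int)), ch, (0 : Int)) 0) 1) 2) 3
      = ([q0, q1, q2, padRow (vals grid 3)], ch || movRow (vals grid 3), cntRow (vals grid 3)) := by
  have h := row3 grid ch q0 q1 q2
  simpa only [List.foldl] using h

-- ===== VERDICT (by name: the statement is the Claim_ definition above) =====
theorem compress_grid_spec : Claim_equal_compress_grid := by
  intro grid _ _
  unfold Spec_compress_grid compress_grid compress_grid_alt
  rw [pyR4]
  simp only [List.foldl, List.map, List.replicate, row0', row1', row2', row3', sorted4, vals]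
  simp [movRow, padRow, List.cons.injEq, decide_not, Bool.or_assoc]
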